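-- pv_equiv track=rewrite | github.com/itsakphyo/itsakphyo-bot | app/services/rag_service.py | _postprocess_response
-- ===== SOURCE A (Python) =====
-- def _postprocess_response(response: str, query_type: str, original_query: str) -> str:
--     """Post-process the response to ensure quality and appropriateness."""
--     # Remove any unwanted prefixes
--     unwanted_prefixes = [
--         "Based on the documents",
--         "According to my knowledge",
--         "From the information provided",
--         "The documents show that",
--     ]
--
--     for prefix in unwanted_prefixes:
--         if response.startswith(prefix):
--             # Find the next sentence start
--             next_sentence = response.find('. ') + 2
--             if next_sentence > 1:
--                 response = response[next_sentence:]
--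
--     # Ensure appropriate response for query type
--     original_lower = original_query.lower().strip()
--
--     # Handle thanks responses
--     if original_lower in ['thanks', 'thank you', 'thx']:
--         return "You're welcome!"
--
--     # Handle short acknowledgments
--     if original_lower in ['ok', 'okay']:
--         return "Is there anything else you'd like to know about Aung Khant Phyo?"
--
--     if original_lower in ['very good', 'great', 'wow that many', 'wow']:
--         return "Great! Feel free to ask me anything else about him."
--
--     if original_lower == 'yes':
--         return "What specifically would you like to know about Aung Khant Phyo?"
--
--     # Handle dismissive responses
--     if original_lower in ['no', 'nope']:
--         return "No problem! Feel free to ask if you want to know more about Aung Khant Phyo later."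
--
--     if original_lower in ['nothing', 'nah']:
--         return "That's fine! I'm here if you want to learn about Aung Khant Phyo anytime."
--
--     # Handle humor/casual comments
--     if 'funny' in original_lower or 'haha' in original_lower:
--         return "Glad you enjoyed that! What else would you like to know about Aung Khant Phyo?"
--
--     # Handle vague queries
--     if original_lower in ['everything', 'tell me everything', 'what happened']:
--         return "What specifically would you like to know about Aung Khant Phyo? I can tell you about his background, skills, experience, projects, or anything else you're curious about!"
--
--     return response.strip()
-- ===== SOURCE B (Python) =====
-- # B: a data-driven rewrite — the prefix stripping is a recursion over the
-- # prefix list, and the whole branch cascade is replaced by ONE generic rule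
-- # interpreter scanning a table of (kind, patterns, reply) rules in order.
--
-- _PREFIXES = (
--     "Based on the documents",
--     "According to my knowledge",
--     "From the information provided",
--     "The documents show that",
-- )
--
-- # rules in the exact order A checks them; kind 'substr' tests 'p in q',
-- # kind 'exact' tests 'p == q'
-- _RULES = (
--     ('exact', ('thanks', 'thank you', 'thx'),
--      "You're welcome!"),
--     ('exact', ('ok', 'okay'),
--      "Is there anything else you'd like to know about Aung Khant Phyo?"),
--     ('exact', ('very good', 'great', 'wow that many', 'wow'),
--      "Great! Feel free to ask me anything else about him."),
--     ('exact', ('yes',),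
--      "What specifically would you like to know about Aung Khant Phyo?"),
--     ('exact', ('no', 'nope'),
--      "No problem! Feel free to ask if you want to know more about Aung Khant Phyo later."),
--     ('exact', ('nothing', 'nah'),
--      "That's fine! I'm here if you want to learn about Aung Khant Phyo anytime."),
--     ('substr', ('funny', 'haha'),
--      "Glad you enjoyed that! What else would you like to know about Aung Khant Phyo?"),
--     ('exact', ('everything', 'tell me everything', 'what happened'),
--      "What specifically would you like to know about Aung Khant Phyo? I can tell you about his background, skills, experience, projects, or anything else you're curious about!"),
-- )
--
--
-- def _strip_prefixes(response, prefixes):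
--     if not prefixes:
--         return response
--     head, rest = prefixes[0], prefixes[1:]
--     if response.startswith(head):
--         cut = response.find('. ')
--         if cut >= 0:
--             response = response[cut + 2:]
--     return _strip_prefixes(response, rest)
--
--
-- def _postprocess_response(response: str, query_type: str, original_query: str) -> str:
--     response = _strip_prefixes(response, _PREFIXES)
--     q = original_query.lower().strip()
--     for kind, patterns, reply in _RULES:
--         if any((p in q) if kind == 'substr' else (p == q) for p in patterns):
--             return reply
--     return response.strip()
-- ===== Notes on version B (the rewrite author's own statement) =====
-- stated objective: simpler
-- what changed: The hardcoded branch cascade is replaced by a generic rule interpreter scanning one declarative (kind, patterns, reply) table that uniformly covers both the exact-match groups and the 'funny'/'haha' substring rule, and the prefix stripping becomes a recursion over the prefix list instead of a mutating for-loop.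
import Mathlib
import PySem

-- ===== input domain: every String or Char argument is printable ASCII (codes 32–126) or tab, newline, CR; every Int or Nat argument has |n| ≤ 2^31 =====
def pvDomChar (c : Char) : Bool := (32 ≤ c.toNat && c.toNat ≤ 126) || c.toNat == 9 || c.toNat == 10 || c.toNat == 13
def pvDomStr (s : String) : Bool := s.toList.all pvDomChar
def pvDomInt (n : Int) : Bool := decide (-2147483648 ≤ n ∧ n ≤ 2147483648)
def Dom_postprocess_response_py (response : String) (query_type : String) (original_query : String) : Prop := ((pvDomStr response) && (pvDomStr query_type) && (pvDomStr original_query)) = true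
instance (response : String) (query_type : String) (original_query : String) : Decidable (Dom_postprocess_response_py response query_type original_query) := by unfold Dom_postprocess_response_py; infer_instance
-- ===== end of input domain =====

-- B replaces A's hardcoded branch cascade with a generic rule interpreter over a
-- declarative (kind, patterns, reply) table, and the prefix loop with a recursion; objective: simpler.

-- ===== PORT A =====
def pvStepA (resp : String) (pre : String) : String :=
  if PySem.Str.startswith resp pre then
    let next_sentence := PySem.Str.find resp ". " + 2
    if next_sentence > 1 then PySem.Str.slice resp (some next_sentence) none else resp
  else resp

def postprocess_response_py (response : String) (query_type : String) (original_query : String) : String :=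
  let response :=
    ["Based on the documents", "According to my knowledge",
     "From the information provided", "The documents show that"].foldl pvStepA response
  let ol := PySem.Str.strip (PySem.Str.lower original_query)
  if ["thanks", "thank you", "thx"].contains ol then
    "You're welcome!"
  else if ["ok", "okay"].contains ol then
    "Is there anything else you'd like to know about Aung Khant Phyo?"
  else if ["very good", "great", "wow that many", "wow"].contains ol then
    "Great! Feel free to ask me anything else about him."
  else if ol = "yes" then
    "What specifically would you like to know about Aung Khant Phyo?"
  else if ["no", "nope"].contains ol then
    "No problem! Feel free to ask if you want to know more about Aung Khant Phyo later."
  else if ["nothing", "nah"].contains ol then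
    "That's fine! I'm here if you want to learn about Aung Khant Phyo anytime."
  else if PySem.Str.isIn "funny" ol || PySem.Str.isIn "haha" ol then
    "Glad you enjoyed that! What else would you like to know about Aung Khant Phyo?"
  else if ["everything", "tell me everything", "what happened"].contains ol then
    "What specifically would you like to know about Aung Khant Phyo? I can tell you about his background, skills, experience, projects, or anything else you're curious about!"
  else
    PySem.Str.strip response

-- ===== PORT B =====
def pvRulesB : List (String × List String × String) :=
  [("exact", ["thanks", "thank you", "thx"],
    "You're welcome!"),
   ("exact", ["ok", "okay"],
    "Is there anything else you'd like to know about Aung Khant Phyo?"),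
   ("exact", ["very good", "great", "wow that many", "wow"],
    "Great! Feel free to ask me anything else about him."),
   ("exact", ["yes"],
    "What specifically would you like to know about Aung Khant Phyo?"),
   ("exact", ["no", "nope"],
    "No problem! Feel free to ask if you want to know more about Aung Khant Phyo later."),
   ("exact", ["nothing", "nah"],
    "That's fine! I'm here if you want to learn about Aung Khant Phyo anytime."),
   ("substr", ["funny", "haha"],
    "Glad you enjoyed that! What else would you like to know about Aung Khant Phyo?"),
   ("exact", ["everything", "tell me everything", "what happened"],
    "What specifically would you like to know about Aung Khant Phyo? I can tell you about his background, skills, experience, projects, or anything else you're curious about!")]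

def pvStripPrefixesB : String → List String → String
  | response, [] => response
  | response, head :: rest =>
    let response :=
      if PySem.Str.startswith response head then
        let cut := PySem.Str.find response ". "
        if cut ≥ 0 then PySem.Str.slice response (some (cut + 2)) none else response
      else response
    pvStripPrefixesB response rest

def pvScanRulesB (q : String) : List (String × List String × String) → Option String
  | [] => none
  | (kind, patterns, reply) :: rest =>
    if patterns.any (fun p => if kind = "substr" then PySem.Str.isIn p q else p == q) then
      some reply
    else pvScanRulesB q rest

def postprocess_response_py_alt (response : String) (query_type : String) (original_query : String) : String :=
  let response := pvStripPrefixesB response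
    ["Based on the documents", "According to my knowledge",
     "From the information provided", "The documents show that"]
  let q := PySem.Str.strip (PySem.Str.lower original_query)
  match pvScanRulesB q pvRulesB with
  | some reply => reply
  | none => PySem.Str.strip response

-- ===== PRECONDITION & SPEC =====
def Spec_postprocess_response_py (response : String) (query_type : String) (original_query : String) (out : String) : Prop := out = postprocess_response_py_alt response query_type original_query
instance (response : String) (query_type : String) (original_query : String) (out : String) : Decidable (Spec_postprocess_response_py response query_type original_query out) := by unfold Spec_postprocess_response_py; infer_instance

-- ===== CLAIM =====
def Claim_equal_postprocess_response_py : Prop := ∀ (response : String) (query_type : String) (original_query : String), Dom_postprocess_response_py response query_type original_query → Spec_postprocess_response_py response query_type original_query (postprocess_response_py response query_type original_query)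

-- ===== LEMMAS AND PROOFS =====

theorem pvStrip_eq_foldl (ps : List String) (resp : String) :
    pvStripPrefixesB resp ps = ps.foldl pvStepA resp := by
  induction ps generalizing resp with
  | nil => rfl
  | cons p rest ih =>
    simp only [pvStripPrefixesB, List.foldl_cons, ih]
    congr 1
    unfold pvStepA
    have hge : -1 ≤ PySem.Chars.find resp.toList ". ".toList :=
      PySem.Chars.neg_one_le_find resp.toList ". ".toList
    simp only [PySem.Str.find_eq]
    split_ifs with hs h1 h2 h2 <;> first | rfl | omega

-- the tail: A's cascade equals the rule-interpreter result, for any q and fallback r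
theorem pvTail_eq (q r : String) :
    (if ["thanks", "thank you", "thx"].contains q then
      "You're welcome!"
    else if ["ok", "okay"].contains q then
      "Is there anything else you'd like to know about Aung Khant Phyo?"
    else if ["very good", "great", "wow that many", "wow"].contains q then
      "Great! Feel free to ask me anything else about him."
    else if q = "yes" then
      "What specifically would you like to know about Aung Khant Phyo?"
    else if ["no", "nope"].contains q then
      "No problem! Feel free to ask if you want to know more about Aung Khant Phyo later."
    else if ["nothing", "nah"].contains q then
      "That's fine! I'm here if you want to learn about Aung Khant Phyo anytime."
    else if PySem.Str.isIn "funny" q || PySem.Str.isIn "haha" q then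
      "Glad you enjoyed that! What else would you like to know about Aung Khant Phyo?"
    else if ["everything", "tell me everything", "what happened"].contains q then
      "What specifically would you like to know about Aung Khant Phyo? I can tell you about his background, skills, experience, projects, or anything else you're curious about!"
    else
      PySem.Str.strip r) =
    (match pvScanRulesB q pvRulesB with
     | some reply => reply
     | none => PySem.Str.strip r) := by
  by_cases h1 : q = "thanks"; · subst h1; rfl
  by_cases h2 : q = "thank you"; · subst h2; rfl
  by_cases h3 : q = "thx"; · subst h3; rfl
  by_cases h4 : q = "ok"; · subst h4; rfl
  by_cases h5 : q = "okay"; · subst h5; rfl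
  by_cases h6 : q = "very good"; · subst h6; rfl
  by_cases h7 : q = "great"; · subst h7; rfl
  by_cases h8 : q = "wow that many"; · subst h8; rfl
  by_cases h9 : q = "wow"; · subst h9; rfl
  by_cases h10 : q = "yes"; · subst h10; rfl
  by_cases h11 : q = "no"; · subst h11; rfl
  by_cases h12 : q = "nope"; · subst h12; rfl
  by_cases h13 : q = "nothing"; · subst h13; rfl
  by_cases h14 : q = "nah"; · subst h14; rfl
  by_cases h15 : q = "everything"; · subst h15; rfl
  by_cases h16 : q = "tell me everything"; · subst h16; rfl
  by_cases h17 : q = "what happened"; · subst h17; rfl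
  -- no exact rule matches: both sides reduce to the funny/haha check, then strip r
  have g1 : ("thanks" == q) = false := by simp [Ne.symm h1]
  have g2 : ("thank you" == q) = false := by simp [Ne.symm h2]
  have g3 : ("thx" == q) = false := by simp [Ne.symm h3]
  have g4 : ("ok" == q) = false := by simp [Ne.symm h4]
  have g5 : ("okay" == q) = false := by simp [Ne.symm h5]
  have g6 : ("very good" == q) = false := by simp [Ne.symm h6]
  have g7 : ("great" == q) = false := by simp [Ne.symm h7]
  have g8 : ("wow that many" == q) = false := by simp [Ne.symm h8]
  have g9 : ("wow" == q) = false := by simp [Ne.symm h9]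
  have g10 : ("yes" == q) = false := by simp [Ne.symm h10]
  have g11 : ("no" == q) = false := by simp [Ne.symm h11]
  have g12 : ("nope" == q) = false := by simp [Ne.symm h12]
  have g13 : ("nothing" == q) = false := by simp [Ne.symm h13]
  have g14 : ("nah" == q) = false := by simp [Ne.symm h14]
  have g15 : ("everything" == q) = false := by simp [Ne.symm h15]
  have g16 : ("tell me everything" == q) = false := by simp [Ne.symm h16]
  have g17 : ("what happened" == q) = false := by simp [Ne.symm h17]
  simp only [pvRulesB, pvScanRulesB, List.any_cons, List.any_nil, String.reduceEq,
    if_false, if_true, g1, g2, g3, g4, g5, g6, g7, g8, g9, g10, g11, g12, g13, g14,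
    g15, g16, g17, Bool.or_false, Bool.false_eq_true]
  simp only [List.contains_eq_mem, List.mem_cons, List.not_mem_nil, or_false, decide_eq_true_eq]
  simp only [h1, h2, h3, h4, h5, h6, h7, h8, h9, h10, h11, h12, h13, h14, h15, h16, h17,
    or_self, if_false]
  split <;> simp_all

-- ===== VERDICT =====
theorem postprocess_response_py_spec : Claim_equal_postprocess_response_py := by
  intro response query_type original_query _
  unfold Spec_postprocess_response_py postprocess_response_py postprocess_response_py_alt
  simp only [pvStrip_eq_foldl]
  exact pvTail_eq (PySem.Str.strip (PySem.Str.lower original_query))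
    (List.foldl pvStepA response
      ["Based on the documents", "According to my knowledge", "From the information provided",
       "The documents show that"])
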